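-- pv_equiv track=rewrite | github.com/Plaskpost/PythonHobbyProjects | HyperbolicMaze/HyperbolicGrid.py | drul_to_brfl
-- ===== SOURCE A (Python) =====
-- d = ["D", "R", "U", "L"]
--
-- def drul_to_brfl(string, initial_direction='U'):
--     """
--     In some situations, it may be beneficial to keep track of how a unit "turns" when traversing the grid rather than
--     directions given some orientation. This function converts a key string given as "drul" = down/right/left/up to
--     brfl = back/right/forward/left given some initial direction.
--
--     :param string: full string
--     :param initial_direction: Since turning direction is based on the previous letter in the string, an initial
--     reference is needed to find the first entry.
--     :returns: string in brfl format.
--     """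
--     brfl = ['B', 'R', 'F', 'L']
--     brfl_string = ""
--     previous_direction = initial_direction
--     for s in string:
--         brfl_index = (d.index(s) - d.index(previous_direction) + 2) % 4
--         brfl_string += brfl[brfl_index]
--         previous_direction = s
--
--     return brfl_string
-- ===== SOURCE B (Python) =====
-- # Vector-geometry reimplementation: each direction is a 2D unit vector; the turn is
-- # classified by dot product (forward/back) and cross product (left/right), and the
-- # string is built by structural recursion instead of an accumulator loop.
-- _VEC = {'D': (0, -1), 'R': (1, 0), 'U': (0, 1), 'L': (-1, 0)}
--
-- def drul_to_brfl(string, initial_direction='U'):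
--     if not string:
--         return ""
--     px, py = _VEC[initial_direction]
--     cx, cy = _VEC[string[0]]
--     dot = px * cx + py * cy
--     if dot == 1:
--         t = 'F'
--     elif dot == -1:
--         t = 'B'
--     elif px * cy - py * cx == 1:
--         t = 'L'
--     else:
--         t = 'R'
--     return t + drul_to_brfl(string[1:], string[0])
-- ===== Notes on version B (the rewrite author's own statement) =====
-- stated objective: alternative
-- what changed: Replaces the index-arithmetic accumulator loop ((d.index(cur)-d.index(prev)+2)%4 into a brfl table) by a structurally recursive vector-geometry classifier: each direction is a 2D unit vector and the turn letter is decided by the dot product (F/B) and the cross product sign (L/R).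
import Mathlib
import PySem

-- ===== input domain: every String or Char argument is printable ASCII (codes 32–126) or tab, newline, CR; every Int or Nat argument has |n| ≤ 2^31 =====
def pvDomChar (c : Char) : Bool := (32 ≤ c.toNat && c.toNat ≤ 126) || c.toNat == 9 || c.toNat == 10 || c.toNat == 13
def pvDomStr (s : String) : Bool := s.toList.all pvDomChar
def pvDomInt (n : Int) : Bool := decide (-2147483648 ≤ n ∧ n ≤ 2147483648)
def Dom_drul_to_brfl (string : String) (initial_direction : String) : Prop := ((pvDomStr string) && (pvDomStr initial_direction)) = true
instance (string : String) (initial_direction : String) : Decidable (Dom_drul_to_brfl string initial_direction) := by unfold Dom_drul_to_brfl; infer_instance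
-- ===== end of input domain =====

-- B replaces the index-arithmetic accumulator loop by a structurally recursive
-- vector-geometry classifier (directions as 2D unit vectors; dot product picks F/B,
-- cross product sign picks L/R); objective: alternative.

-- ===== PORT A =====
-- module-level: d = ["D", "R", "U", "L"]
def pyD : List String := ["D", "R", "U", "L"]

def drul_to_brfl (string : String) (initial_direction : String) : String :=
  let brfl : List String := ["B", "R", "F", "L"]
  -- loop state: (brfl_string, previous_direction); .index and brfl[i] cannot fail inside Pre_
  (string.toList.foldl
    (fun (st : String × String) s =>
      let brfl_index : Int :=
        PySem.Int.mod ((((PySem.List.index? pyD (String.ofList [s])).getD 0 : Nat) : Int)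
          - (((PySem.List.index? pyD st.2).getD 0 : Nat) : Int) + 2) 4
      (st.1 ++ (PySem.List.pyGet? brfl brfl_index).getD "", String.ofList [s]))
    ("", initial_direction)).1

-- ===== PORT B =====
-- _VEC = {'D': (0, -1), 'R': (1, 0), 'U': (0, 1), 'L': (-1, 0)}
def pyVec : PySem.Dict String (Int × Int) :=
  ((((PySem.Dict.empty).insert "D" (0, -1)).insert "R" (1, 0)).insert "U" (0, 1)).insert "L" (-1, 0)

-- recursive body of B, transcribed over the char list (string[0] / string[1:] are the
-- structural head/tail); dict lookup cannot fail inside Pre_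
def altGo : List Char → String → String
  | [], _ => ""
  | c :: t, initial_direction =>
    let p := (PySem.Dict.get? pyVec initial_direction).getD (0, 0)
    let cv := (PySem.Dict.get? pyVec (String.ofList [c])).getD (0, 0)
    let dot := p.1 * cv.1 + p.2 * cv.2
    let tch : String :=
      if dot = 1 then "F"
      else if dot = -1 then "B"
      else if p.1 * cv.2 - p.2 * cv.1 = 1 then "L"
      else "R"
    tch ++ altGo t (String.ofList [c])

def drul_to_brfl_alt (string : String) (initial_direction : String) : String :=
  altGo string.toList initial_direction

-- ===== PRECONDITION & SPEC =====
-- A raises ValueError when a character of string is not one of D/R/U/L, or when string is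
-- nonempty and initial_direction is not one of the four one-letter direction strings; Pre_ excludes exactly those.
def Pre_drul_to_brfl (string : String) (initial_direction : String) : Prop :=
  (string.toList.all (fun c => c ∈ (['D', 'R', 'U', 'L'] : List Char))) = true ∧
  (string ≠ "" → (["D", "R", "U", "L"] : List String).contains initial_direction = true)

instance (string : String) (initial_direction : String) : Decidable (Pre_drul_to_brfl string initial_direction) := by
  unfold Pre_drul_to_brfl; infer_instance

def pvWitness_drul_to_brfl : String × String := ("DR", "U")

def Spec_drul_to_brfl (string : String) (initial_direction : String) (out : String) : Prop := out = drul_to_brfl_alt string initial_direction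
instance (string : String) (initial_direction : String) (out : String) : Decidable (Spec_drul_to_brfl string initial_direction out) := by unfold Spec_drul_to_brfl; infer_instance

-- ===== CLAIM (what is proved, stated in full; the proofs are below) =====
def Claim_equal_drul_to_brfl : Prop := ∀ (string : String) (initial_direction : String), Dom_drul_to_brfl string initial_direction → Pre_drul_to_brfl string initial_direction → Spec_drul_to_brfl string initial_direction (drul_to_brfl string initial_direction)

-- ===== LEMMAS AND PROOFS =====

-- A's per-step output letter, and A's loop tail as a structural recursion
def stepOutA (prev : String) (c : Char) : String :=
  (PySem.List.pyGet? (["B", "R", "F", "L"] : List String)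
    (PySem.Int.mod ((((PySem.List.index? pyD (String.ofList [c])).getD 0 : Nat) : Int)
      - (((PySem.List.index? pyD prev).getD 0 : Nat) : Int) + 2) 4)).getD ""

def tailA (prev : String) : List Char → String
  | [] => ""
  | c :: t => stepOutA prev c ++ tailA (String.ofList [c]) t

lemma foldA_eq (l : List Char) (acc prev : String) :
    (l.foldl
      (fun (st : String × String) s =>
        let brfl_index : Int :=
          PySem.Int.mod ((((PySem.List.index? pyD (String.ofList [s])).getD 0 : Nat) : Int)
            - (((PySem.List.index? pyD st.2).getD 0 : Nat) : Int) + 2) 4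
        (st.1 ++ (PySem.List.pyGet? (["B", "R", "F", "L"] : List String) brfl_index).getD "", String.ofList [s]))
      (acc, prev)).1 = acc ++ tailA prev l := by
  induction l generalizing acc prev with
  | nil => simp [tailA]
  | cons c t ih =>
      simp only [List.foldl_cons, ih, tailA, stepOutA]
      rw [String.append_assoc]

-- agreement of the two steps on the sixteen valid (prev, cur) pairs
lemma tail_eq (l : List Char) (p : String) (hp : p ∈ (["D", "R", "U", "L"] : List String))
    (hl : ∀ c ∈ l, c ∈ (['D', 'R', 'U', 'L'] : List Char)) :
    tailA p l = altGo l p := by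
  induction l generalizing p with
  | nil => rfl
  | cons c t ih =>
      have hc := hl c (by simp)
      rw [tailA, altGo, ih (String.ofList [c])
        (by fin_cases hc <;> decide) (fun x hx => hl x (by simp [hx]))]
      have hstep : stepOutA p c =
          (let pv := (PySem.Dict.get? pyVec p).getD (0, 0)
           let cv := (PySem.Dict.get? pyVec (String.ofList [c])).getD (0, 0)
           let dot := pv.1 * cv.1 + pv.2 * cv.2
           if dot = 1 then ("F" : String)
           else if dot = -1 then "B"
           else if pv.1 * cv.2 - pv.2 * cv.1 = 1 then "L"
           else "R") := by
        fin_cases hp <;> fin_cases hc <;> decide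
      simp only [hstep]

-- ===== VERDICT (by name: the statement is the Claim_ definition above) =====
theorem drul_to_brfl_spec : Claim_equal_drul_to_brfl := by
  intro s i _ hpre
  unfold Spec_drul_to_brfl drul_to_brfl
  obtain ⟨hchars0, hinit⟩ := hpre
  have hchars : ∀ c ∈ s.toList, c ∈ (['D', 'R', 'U', 'L'] : List Char) := by
    intro c hc; exact of_decide_eq_true (List.all_eq_true.mp hchars0 c hc)
  by_cases hs : s = ""
  · subst hs
    rfl
  · have hi : i ∈ (["D", "R", "U", "L"] : List String) := by simpa using hinit hs
    rw [foldA_eq, tail_eq s.toList i hi hchars]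
    simp [drul_to_brfl_alt]
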